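-- pv_equiv track=rewrite | github.com/thecgs/pyCUBs | pyCUBs/pycubcore.py | get_shape_and_color
-- ===== SOURCE A (Python) =====
-- def get_shape_and_color(length):
--     shapes = ["o", "s", "^", "<", ">", "v", "p", "P", "*", "h", "H", "+", "x", "X", "D", "d", "8"]
--     colors = ["#1F77B4FF", "#FF7F0EFF", "#2CA02CFF", "#D62728FF", "#9467BDFF", "#8C564BFF", "#E377C2FF", "#7F7F7FFF", "#BCBD22FF", "#17BECFFF"]
--     n = len(shapes) * len(colors)
--     l = []
--     for x in shapes:
--         for y in colors:
--             l.append((x, y))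
--     res = []
--     for i in range(0, length):
--         res.append(l[i%n])
--     return res
-- ===== SOURCE B (Python) =====
-- def get_shape_and_color(length):
--     shapes = ["o", "s", "^", "<", ">", "v", "p", "P", "*", "h", "H", "+", "x", "X", "D", "d", "8"]
--     colors = ["#1F77B4FF", "#FF7F0EFF", "#2CA02CFF", "#D62728FF", "#9467BDFF", "#8C564BFF", "#E377C2FF", "#7F7F7FFF", "#BCBD22FF", "#17BECFFF"]
--     n = len(shapes) * len(colors)
--     nc = len(colors)
--     return [(shapes[(i % n) // nc], colors[(i % n) % nc]) for i in range(length)]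
-- ===== Notes on version B (the rewrite author's own statement) =====
-- stated objective: simpler
-- what changed: B drops A's precomputed 170-pair product table and nested table-building loops, computing each pair directly by modular div/mod arithmetic on the index in a single comprehension.
import Mathlib
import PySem

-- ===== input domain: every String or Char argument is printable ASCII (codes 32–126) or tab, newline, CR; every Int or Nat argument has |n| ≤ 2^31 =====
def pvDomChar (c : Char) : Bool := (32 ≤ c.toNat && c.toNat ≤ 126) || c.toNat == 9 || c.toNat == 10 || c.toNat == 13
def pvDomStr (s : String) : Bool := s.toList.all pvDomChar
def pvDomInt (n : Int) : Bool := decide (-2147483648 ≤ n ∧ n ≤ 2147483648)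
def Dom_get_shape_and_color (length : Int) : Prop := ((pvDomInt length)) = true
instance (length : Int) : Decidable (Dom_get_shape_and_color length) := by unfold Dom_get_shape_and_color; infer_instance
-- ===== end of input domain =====

-- B replaces A's precomputed 170-pair product table (built by nested loops) with direct
-- div/mod arithmetic per index; simpler, same return value.

def pvShapes : List String := ["o", "s", "^", "<", ">", "v", "p", "P", "*", "h", "H", "+", "x", "X", "D", "d", "8"]
def pvColors : List String := ["#1F77B4FF", "#FF7F0EFF", "#2CA02CFF", "#D62728FF", "#9467BDFF", "#8C564BFF", "#E377C2FF", "#7F7F7FFF", "#BCBD22FF", "#17BECFFF"]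

-- ===== PORT A =====
def get_shape_and_color (length : Int) : List (String × String) :=
  let shapes := pvShapes
  let colors := pvColors
  let n : Int := (shapes.length : Int) * (colors.length : Int)
  let l : List (String × String) :=
    shapes.foldl (fun l x => colors.foldl (fun l y => l ++ [(x, y)]) l) []
  (PySem.List.pyRange 0 length 1).foldl
    (fun res i => res ++ [PySem.List.pyGetD l (PySem.Int.mod i n) ("", "")]) []

-- ===== PORT B =====
def get_shape_and_color_alt (length : Int) : List (String × String) :=
  let shapes := pvShapes
  let colors := pvColors
  let n : Int := (shapes.length : Int) * (colors.length : Int)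
  let nc : Int := (colors.length : Int)
  (PySem.List.pyRange 0 length 1).map (fun i =>
    (PySem.List.pyGetD shapes (PySem.Int.floordiv (PySem.Int.mod i n) nc) "",
     PySem.List.pyGetD colors (PySem.Int.mod (PySem.Int.mod i n) nc) ""))

-- ===== PRECONDITION & SPEC =====
def Spec_get_shape_and_color (length : Int) (out : List (String × String)) : Prop := out = get_shape_and_color_alt length
instance (length : Int) (out : List (String × String)) : Decidable (Spec_get_shape_and_color length out) := by unfold Spec_get_shape_and_color; infer_instance

-- ===== CLAIM (what is proved, stated in full; the proofs are below) =====
def Claim_equal_get_shape_and_color : Prop := ∀ (length : Int), Dom_get_shape_and_color length → Spec_get_shape_and_color length (get_shape_and_color length)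

-- ===== LEMMAS AND PROOFS =====

-- A's nested table-building loop is the cartesian product as a flatMap
theorem pvTable_eq :
    pvShapes.foldl (fun l x => pvColors.foldl (fun l y => l ++ [(x, y)]) l) []
      = pvShapes.flatMap (fun x => pvColors.map (fun y => (x, y))) := by
  have h : (fun (l : List (String × String)) (x : String) =>
      pvColors.foldl (fun l y => l ++ [(x, y)]) l)
      = fun l x => l ++ pvColors.map (fun y => (x, y)) := by
    funext l x
    exact PySem.List.foldl_append_singleton_eq_map _ pvColors l
  rw [h, PySem.List.foldl_append_eq_flatMap, List.nil_append]

-- indexing into a cartesian-product flatMap is div/mod indexing into the factors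
theorem pvProdGetD {α β : Type} (xs : List α) (ys : List β) (dx : α) (dy : β) (k : Nat)
    (hk : k < xs.length * ys.length) :
    (xs.flatMap (fun x => ys.map (fun y => (x, y)))).getD k (dx, dy)
      = (xs.getD (k / ys.length) dx, ys.getD (k % ys.length) dy) := by
  induction xs generalizing k with
  | nil => simp at hk
  | cons x xs ih =>
    have hy : 0 < ys.length := by by_contra h; simp [Nat.le_zero.mp (Nat.not_lt.mp h)] at hk
    rw [List.flatMap_cons]
    by_cases h : k < ys.length
    · rw [List.getD_eq_getElem?_getD, List.getElem?_append_left (by simpa using h)]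
      rw [Nat.div_eq_of_lt h, Nat.mod_eq_of_lt h]
      simp [List.getElem?_map, List.getElem?_eq_getElem h, List.getD_eq_getElem?_getD]
    · have hk' : k - ys.length < xs.length * ys.length := by
        simp only [List.length_cons, Nat.succ_mul] at hk
        have := Nat.not_lt.mp h
        omega
      rw [List.getD_eq_getElem?_getD,
        List.getElem?_append_right (by simpa using Nat.not_lt.mp h)]
      have hsub : k - (ys.map (fun y => (x, y))).length = k - ys.length := by simp
      rw [hsub, ← List.getD_eq_getElem?_getD, ih _ hk']
      have hdiv : k / ys.length = (k - ys.length) / ys.length + 1 :=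
        Nat.div_eq_sub_div hy (Nat.not_lt.mp h)
      have hmod : k % ys.length = (k - ys.length) % ys.length := by
        have := Nat.not_lt.mp h
        conv_lhs => rw [← Nat.sub_add_cancel this, Nat.add_mod_right]
      rw [hdiv, hmod, List.getD_cons_succ]

-- pointwise agreement of the two indexings on residues 0 ≤ i < 170
theorem pvPointwise (i : Int) (h0 : 0 ≤ i) (h1 : i < 170) :
    PySem.List.pyGetD (pvShapes.flatMap (fun x => pvColors.map (fun y => (x, y)))) i ("", "")
      = (PySem.List.pyGetD pvShapes (PySem.Int.floordiv i 10) "",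
         PySem.List.pyGetD pvColors (PySem.Int.mod i 10) "") := by
  have hi : i = ((i.toNat : Nat) : Int) := by omega
  have hd : PySem.Int.floordiv ((i.toNat : Nat) : Int) 10 = ((i.toNat / 10 : Nat) : Int) := by
    exact_mod_cast PySem.Int.floordiv_natCast i.toNat 10
  have hm : PySem.Int.mod ((i.toNat : Nat) : Int) 10 = ((i.toNat % 10 : Nat) : Int) := by
    exact_mod_cast PySem.Int.mod_natCast i.toNat 10
  rw [hi, hd, hm, PySem.List.pyGetD_natCast, PySem.List.pyGetD_natCast,
    PySem.List.pyGetD_natCast]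
  have hc10 : pvColors.length = 10 := by simp [pvColors]
  rw [← hc10]
  exact pvProdGetD pvShapes pvColors "" "" i.toNat (by simp [pvShapes, pvColors]; omega)

theorem get_shape_and_color_spec : Claim_equal_get_shape_and_color := by
  intro length _
  unfold Spec_get_shape_and_color get_shape_and_color get_shape_and_color_alt
  simp only
  rw [pvTable_eq, PySem.List.foldl_append_singleton_eq_map, List.nil_append]
  refine List.map_congr_left ?_
  intro i hi
  have hi' : 0 ≤ i := (PySem.List.mem_pyRange_one.mp hi).1
  have hn : ((pvShapes.length : Int) * (pvColors.length : Int)) = 170 := by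
    simp [pvShapes, pvColors]
  rw [hn]
  have hm0 : 0 ≤ PySem.Int.mod i 170 := PySem.Int.mod_nonneg i (by omega)
  have hm1 : PySem.Int.mod i 170 < 170 := PySem.Int.mod_lt i (by omega)
  have hc : (pvColors.length : Int) = 10 := by simp [pvColors]
  rw [hc]
  exact pvPointwise _ hm0 hm1
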